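-- pv_equiv track=rewrite | github.com/alanbondarun/GestureTextInputAnalysis | anallib.py | get_uncorrected_errors
-- ===== SOURCE A (Python) =====
-- def get_uncorrected_errors(expected_str, input_str):
--     nums = [[0 for x in range(len(input_str) + 1)] for y in range(len(expected_str) + 1)]
--     commands = [[0 for x in range(len(input_str) + 1)] for y in range(len(expected_str) + 1)]
--     cmd_insert = 1
--     cmd_delete = 2
--     cmd_correct = 3
--     cmd_modify = 0
--
--     for i in range(1, len(expected_str) + 1):
--         nums[i][0] = i
--         commands[i][0] = cmd_insert
--     for j in range(1, len(input_str) + 1):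
--         nums[0][j] = j
--         commands[0][j] = cmd_delete
--     for i in range(1, len(expected_str) + 1):
--         for j in range(1, len(input_str) + 1):
--             if expected_str[i-1] == input_str[j-1]:
--                 nums[i][j] = nums[i-1][j-1]
--                 commands[i][j] = cmd_correct
--             else:
--                 minval = min(nums[i-1][j], nums[i][j-1], nums[i-1][j-1])
--                 if minval == nums[i-1][j]:
--                     nums[i][j] = nums[i-1][j] + 1
--                     commands[i][j] = cmd_insert
--                 elif minval == nums[i][j-1]:
--                     nums[i][j] = nums[i][j-1] + 1
--                     commands[i][j] = cmd_delete
--                 else: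
--                     nums[i][j] = nums[i-1][j-1] + 1
--                     commands[i][j] = cmd_modify
--
--     pos_i = len(expected_str)
--     pos_j = len(input_str)
--     dict_error = {}
--     while pos_i > 0 and pos_j > 0:
--         if commands[pos_i][pos_j] == cmd_correct:
--             pos_i -= 1
--             pos_j -= 1
--         elif commands[pos_i][pos_j] == cmd_insert:
--             pos_i -= 1
--         elif commands[pos_i][pos_j] == cmd_delete:
--             pos_j -= 1
--             if input_str[pos_j] not in dict_error:
--                 dict_error[input_str[pos_j]] = 1
--             else:
--                 dict_error[input_str[pos_j]] += 1
--         else: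
--             pos_i -= 1
--             pos_j -= 1
--             if input_str[pos_j] not in dict_error:
--                 dict_error[input_str[pos_j]] = 1
--             else:
--                 dict_error[input_str[pos_j]] += 1
--     while pos_j > 0:
--         pos_j -= 1
--         if input_str[pos_j] not in dict_error:
--             dict_error[input_str[pos_j]] = 1
--         else:
--             dict_error[input_str[pos_j]] += 1
--
--     return dict_error
-- ===== SOURCE B (Python) =====
-- def get_uncorrected_errors(expected_str, input_str):
--     # Solution-carrying DP: each cell holds (cost, cons-list of uncorrected input
--     # chars along the tie-broken optimal path), so no backpointer table and no
--     # traceback loop exist; the answer is read off the final cell's cons list.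
--     m, n = len(expected_str), len(input_str)
--     path = None
--     prev = [(0, None)]
--     for j in range(1, n + 1):
--         path = (input_str[j - 1], path)
--         prev.append((j, path))
--     for i in range(1, m + 1):
--         cur = [(i, None)]
--         for j in range(1, n + 1):
--             if expected_str[i - 1] == input_str[j - 1]:
--                 cur.append(prev[j - 1])
--             else:
--                 up_c, up_p = prev[j]
--                 left_c, left_p = cur[j - 1]
--                 diag_c, diag_p = prev[j - 1]
--                 best = min(up_c, left_c, diag_c)
--                 if best == up_c:
--                     cur.append((up_c + 1, up_p))
--                 elif best == left_c:
--                     cur.append((left_c + 1, (input_str[j - 1], left_p)))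
--                 else:
--                     cur.append((diag_c + 1, (input_str[j - 1], diag_p)))
--         prev = cur
--     dict_error = {}
--     node = prev[n][1]
--     while node is not None:
--         ch, node = node
--         dict_error[ch] = dict_error.get(ch, 0) + 1
--     return dict_error
-- ===== Notes on version B (the rewrite author's own statement) =====
-- stated objective: alternative
-- what changed: B is a solution-carrying DP: each cell stores (cost, shared cons-list of the uncorrected input chars along its tie-broken path), so A's backpointer 'commands' table and the whole backward traceback loop (and trailing drain loop) disappear; the answer is counted off the final cell's cons list in one linear walk.
import Mathlib
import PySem

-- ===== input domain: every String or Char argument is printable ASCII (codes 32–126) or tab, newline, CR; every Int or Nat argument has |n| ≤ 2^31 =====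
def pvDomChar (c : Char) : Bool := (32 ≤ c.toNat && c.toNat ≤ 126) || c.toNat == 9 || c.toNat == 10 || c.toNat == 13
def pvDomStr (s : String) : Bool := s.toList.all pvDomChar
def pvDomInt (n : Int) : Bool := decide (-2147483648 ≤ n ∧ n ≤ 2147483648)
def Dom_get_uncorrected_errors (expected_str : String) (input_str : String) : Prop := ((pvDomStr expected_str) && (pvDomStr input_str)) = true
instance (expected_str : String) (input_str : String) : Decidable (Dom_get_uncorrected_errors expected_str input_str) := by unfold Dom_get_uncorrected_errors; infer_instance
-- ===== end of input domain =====

-- B carries the uncorrected-char path inside each DP cell (a shared cons list),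
-- so the backpointer table and the traceback loops of A disappear.

-- ===== PORT A =====
-- Python's in-place 2D list mutation 'nums[i][j] = v' is modeled exactly as function update
-- (cells identified by their pair of indices); reads 'nums[i][j]' are applications.
def pvSet (t : Nat → Nat → Int) (i j : Nat) (v : Int) : Nat → Nat → Int :=
  fun a b => if a = i ∧ b = j then v else t a b

-- 'if input_str[pos] not in dict_error: dict_error[...] = 1 else: += 1' (keys are 1-char strings)
def pvBump (d : PySem.Dict String Int) (c : Char) : PySem.Dict String Int :=
  match d.get? (String.ofList [c]) with
  | none => d.insert (String.ofList [c]) 1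
  | some v => d.insert (String.ofList [c]) (v + 1)

-- trailing 'while pos_j > 0' loop of A
def pvDrain (ic : List Char) : Nat → PySem.Dict String Int → PySem.Dict String Int
  | 0, d => d
  | j + 1, d => pvDrain ic j (pvBump d (ic.getD j ' '))

-- state = (nums, commands)
-- 'for i in range(1, len(expected_str)+1): nums[i][0] = i; commands[i][0] = cmd_insert'
def pvA_loop1 (s : (Nat → Nat → Int) × (Nat → Nat → Int)) :
    Nat → (Nat → Nat → Int) × (Nat → Nat → Int)
  | 0 => s
  | k + 1 =>
    let s' := pvA_loop1 s k
    (pvSet s'.1 (k + 1) 0 (k + 1), pvSet s'.2 (k + 1) 0 1)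

-- 'for j in range(1, len(input_str)+1): nums[0][j] = j; commands[0][j] = cmd_delete'
def pvA_loop2 (s : (Nat → Nat → Int) × (Nat → Nat → Int)) :
    Nat → (Nat → Nat → Int) × (Nat → Nat → Int)
  | 0 => s
  | k + 1 =>
    let s' := pvA_loop2 s k
    (pvSet s'.1 0 (k + 1) (k + 1), pvSet s'.2 0 (k + 1) 2)

-- body of the nested fill loop at (i, j), 1 ≤ i, 1 ≤ j (indices always in range there,
-- so 'expected_str[i-1]' is ec.getD (i-1) ' ')
def pvA_cell (ec ic : List Char) (s : (Nat → Nat → Int) × (Nat → Nat → Int)) (i j : Nat) :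
    (Nat → Nat → Int) × (Nat → Nat → Int) :=
  if ec.getD (i - 1) ' ' == ic.getD (j - 1) ' ' then
    (pvSet s.1 i j (s.1 (i - 1) (j - 1)), pvSet s.2 i j 3)
  else
    let minval := min (min (s.1 (i - 1) j) (s.1 i (j - 1))) (s.1 (i - 1) (j - 1))
    if minval = s.1 (i - 1) j then
      (pvSet s.1 i j (s.1 (i - 1) j + 1), pvSet s.2 i j 1)
    else if minval = s.1 i (j - 1) then
      (pvSet s.1 i j (s.1 i (j - 1) + 1), pvSet s.2 i j 2)
    else
      (pvSet s.1 i j (s.1 (i - 1) (j - 1) + 1), pvSet s.2 i j 0)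

-- inner 'for j in range(1, len(input_str)+1)' of row i, first r iterations
def pvA_row (ec ic : List Char) (i : Nat) (s : (Nat → Nat → Int) × (Nat → Nat → Int)) :
    Nat → (Nat → Nat → Int) × (Nat → Nat → Int)
  | 0 => s
  | r + 1 => pvA_cell ec ic (pvA_row ec ic i s r) i (r + 1)

-- outer 'for i in range(1, len(expected_str)+1)', first k rows
def pvA_fill (ec ic : List Char) (s : (Nat → Nat → Int) × (Nat → Nat → Int)) :
    Nat → (Nat → Nat → Int) × (Nat → Nat → Int)
  | 0 => s
  | k + 1 => pvA_row ec ic (k + 1) (pvA_fill ec ic s k) ic.length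

-- 'while pos_i > 0 and pos_j > 0' traceback, then the trailing drain loop
def pvA_trace (cmds : Nat → Nat → Int) (ic : List Char) :
    Nat → Nat → PySem.Dict String Int → PySem.Dict String Int
  | 0, j, d => pvDrain ic j d
  | _ + 1, 0, d => d
  | i + 1, j + 1, d =>
    if cmds (i + 1) (j + 1) = 3 then pvA_trace cmds ic i j d
    else if cmds (i + 1) (j + 1) = 1 then pvA_trace cmds ic i (j + 1) d
    else if cmds (i + 1) (j + 1) = 2 then pvA_trace cmds ic (i + 1) j (pvBump d (ic.getD j ' '))
    else pvA_trace cmds ic i j (pvBump d (ic.getD j ' '))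
  termination_by i j => (i, j)

def get_uncorrected_errors (expected_str : String) (input_str : String) : List (String × Int) :=
  let ec := expected_str.toList
  let ic := input_str.toList
  let s0 := pvA_loop2 (pvA_loop1 (fun _ _ => 0, fun _ _ => 0) ec.length) ic.length
  let s := pvA_fill ec ic s0 ec.length
  (pvA_trace s.2 ic ec.length ic.length PySem.Dict.empty).items

-- ===== PORT B =====
-- a cell is (cost, cons-list of uncorrected chars); Python's None/(c, rest) is []/(c :: rest)

-- base row: 'prev = [(0, None)]' then for j = 1..k: 'path = (ic[j-1], path); prev.append((j, path))'
-- (returns the row so far together with the running 'path' variable)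
def pvB_base (ic : List Char) : Nat → List (Int × List Char) × List Char
  | 0 => ([(0, [])], [])
  | j + 1 =>
    let s := pvB_base ic j
    let path := ic.getD j ' ' :: s.2
    (s.1 ++ [(((j : Int) + 1), path)], path)

-- inner loop of row i (c = expected_str[i-1]): 'cur = [(i, None)]' then the j-loop, r steps
def pvB_row (c : Char) (ic : List Char) (prev : List (Int × List Char)) (i : Int) :
    Nat → List (Int × List Char)
  | 0 => [(i, [])]
  | r + 1 =>
    let cur := pvB_row c ic prev i r
    if c == ic.getD r ' ' then cur ++ [prev.getD r (0, [])]
    else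
      let up := prev.getD (r + 1) (0, [])
      let left := cur.getD r (0, [])
      let diag := prev.getD r (0, [])
      let best := min (min up.1 left.1) diag.1
      if best = up.1 then cur ++ [(up.1 + 1, up.2)]
      else if best = left.1 then cur ++ [(left.1 + 1, ic.getD r ' ' :: left.2)]
      else cur ++ [(diag.1 + 1, ic.getD r ' ' :: diag.2)]

-- outer loop: 'for i in range(1, m+1): … prev = cur', first k rows
def pvB_fill (ec ic : List Char) (base : List (Int × List Char)) :
    Nat → List (Int × List Char)
  | 0 => base
  | k + 1 => pvB_row (ec.getD k ' ') ic (pvB_fill ec ic base k) ((k : Int) + 1) ic.length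

-- final counting walk over the cons list ('while node is not None')
def pvCount : List Char → PySem.Dict String Int → PySem.Dict String Int
  | [], d => d
  | c :: rest, d => pvCount rest (pvBump d c)

def get_uncorrected_errors_alt (expected_str : String) (input_str : String) : List (String × Int) :=
  let ec := expected_str.toList
  let ic := input_str.toList
  let base := (pvB_base ic ic.length).1
  let last := pvB_fill ec ic base ec.length
  (pvCount (last.getD ic.length (0, [])).2 PySem.Dict.empty).items

-- ===== PRECONDITION & SPEC =====
def Spec_get_uncorrected_errors (expected_str : String) (input_str : String) (out : List (String × Int)) : Prop := out = get_uncorrected_errors_alt expected_str input_str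
instance (expected_str : String) (input_str : String) (out : List (String × Int)) : Decidable (Spec_get_uncorrected_errors expected_str input_str out) := by unfold Spec_get_uncorrected_errors; infer_instance

-- ===== CLAIM (what is proved, stated in full; the proofs are below) =====
def Claim_equal_get_uncorrected_errors : Prop := ∀ (expected_str : String) (input_str : String), Dom_get_uncorrected_errors expected_str input_str → Spec_get_uncorrected_errors expected_str input_str (get_uncorrected_errors expected_str input_str)

-- ===== LEMMAS AND PROOFS =====

-- the edit-distance recurrence both versions compute
def pvN (ec ic : List Char) : Nat → Nat → Int
  | 0, j => j
  | i + 1, 0 => (i : Int) + 1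
  | i + 1, j + 1 =>
    if ec.getD i ' ' == ic.getD j ' ' then pvN ec ic i j
    else min (min (pvN ec ic i (j + 1)) (pvN ec ic (i + 1) j)) (pvN ec ic i j) + 1
  termination_by i j => (i, j)

-- the command A stores at an interior cell, expressed through pvN
def pvC (ec ic : List Char) (i j : Nat) : Int :=
  if ec.getD i ' ' == ic.getD j ' ' then 3
  else
    let mv := min (min (pvN ec ic i (j + 1)) (pvN ec ic (i + 1) j)) (pvN ec ic i j)
    if mv = pvN ec ic i (j + 1) then 1
    else if mv = pvN ec ic (i + 1) j then 2
    else 0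

-- the sequence of uncorrected chars along the tie-broken path from (i, j)
def pvPath (ec ic : List Char) : Nat → Nat → List Char
  | 0, j => (ic.take j).reverse
  | _ + 1, 0 => []
  | i + 1, j + 1 =>
    if ec.getD i ' ' == ic.getD j ' ' then pvPath ec ic i j
    else
      let mv := min (min (pvN ec ic i (j + 1)) (pvN ec ic (i + 1) j)) (pvN ec ic i j)
      if mv = pvN ec ic i (j + 1) then pvPath ec ic i (j + 1)
      else if mv = pvN ec ic (i + 1) j then ic.getD j ' ' :: pvPath ec ic (i + 1) j
      else ic.getD j ' ' :: pvPath ec ic i j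
  termination_by i j => (i, j)

-- loop1 writes exactly the cells (a, 0), 1 ≤ a ≤ k
theorem pvA_loop1_fst (s : (Nat → Nat → Int) × (Nat → Nat → Int)) (k a b : Nat) :
    (pvA_loop1 s k).1 a b = if b = 0 ∧ 1 ≤ a ∧ a ≤ k then (a : Int) else s.1 a b := by
  induction k with
  | zero => simp [pvA_loop1]; omega
  | succ k ih =>
    simp only [pvA_loop1, pvSet, ih]
    split_ifs <;> first | rfl | omega

-- loop2 writes exactly the cells (0, b), 1 ≤ b ≤ k
theorem pvA_loop2_fst (s : (Nat → Nat → Int) × (Nat → Nat → Int)) (k a b : Nat) :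
    (pvA_loop2 s k).1 a b = if a = 0 ∧ 1 ≤ b ∧ b ≤ k then (b : Int) else s.1 a b := by
  induction k with
  | zero => simp [pvA_loop2]; omega
  | succ k ih =>
    simp only [pvA_loop2, pvSet, ih]
    split_ifs <;> first | rfl | omega

-- a cell step leaves every other cell alone
theorem pvA_cell_untouched (ec ic : List Char) (s : (Nat → Nat → Int) × (Nat → Nat → Int))
    (i j a b : Nat) (h : ¬(a = i ∧ b = j)) :
    (pvA_cell ec ic s i j).1 a b = s.1 a b ∧ (pvA_cell ec ic s i j).2 a b = s.2 a b := by
  unfold pvA_cell; dsimp only []; repeat' split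
  all_goals exact ⟨by simp [pvSet, h], by simp [pvSet, h]⟩

-- the cost a cell step writes is the recurrence value
theorem pvA_cell_fst_at (ec ic : List Char) (s : (Nat → Nat → Int) × (Nat → Nat → Int))
    (i j : Nat) :
    (pvA_cell ec ic s i j).1 i j =
      if ec.getD (i - 1) ' ' == ic.getD (j - 1) ' ' then s.1 (i - 1) (j - 1)
      else min (min (s.1 (i - 1) j) (s.1 i (j - 1))) (s.1 (i - 1) (j - 1)) + 1 := by
  unfold pvA_cell; dsimp only []; repeat' split
  all_goals simp [pvSet]; all_goals omega

-- the command a cell step writes, as a function of the surrounding costs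
theorem pvA_cell_snd_at (ec ic : List Char) (s : (Nat → Nat → Int) × (Nat → Nat → Int))
    (i j : Nat) :
    (pvA_cell ec ic s i j).2 i j =
      if ec.getD (i - 1) ' ' == ic.getD (j - 1) ' ' then 3
      else
        let mv := min (min (s.1 (i - 1) j) (s.1 i (j - 1))) (s.1 (i - 1) (j - 1))
        if mv = s.1 (i - 1) j then 1 else if mv = s.1 i (j - 1) then 2 else 0 := by
  unfold pvA_cell; dsimp only []; repeat' split
  all_goals simp [pvSet]

-- a row pass touches only the cells (i, b), 1 ≤ b ≤ r
theorem pvA_row_untouched (ec ic : List Char) (i : Nat)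
    (s : (Nat → Nat → Int) × (Nat → Nat → Int)) (r a b : Nat)
    (h : ¬(a = i ∧ 1 ≤ b ∧ b ≤ r)) :
    (pvA_row ec ic i s r).1 a b = s.1 a b ∧ (pvA_row ec ic i s r).2 a b = s.2 a b := by
  induction r with
  | zero => exact ⟨rfl, rfl⟩
  | succ r ih =>
    have h1 : ¬(a = i ∧ b = r + 1) := by omega
    have h2 : ¬(a = i ∧ 1 ≤ b ∧ b ≤ r) := by omega
    have u := pvA_cell_untouched ec ic (pvA_row ec ic i s r) i (r + 1) a b h1
    have := ih h2
    exact ⟨by rw [pvA_row, u.1, this.1], by rw [pvA_row, u.2, this.2]⟩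

-- filling row i+1 from a correct row i yields pvN costs and pvC commands
theorem pvA_row_correct (ec ic : List Char) (i : Nat)
    (s : (Nat → Nat → Int) × (Nat → Nat → Int))
    (Hprev : ∀ b, b ≤ ic.length → s.1 i b = pvN ec ic i b)
    (Hcur0 : s.1 (i + 1) 0 = pvN ec ic (i + 1) 0) :
    ∀ r, r ≤ ic.length →
      (∀ b, b ≤ r → (pvA_row ec ic (i + 1) s r).1 (i + 1) b = pvN ec ic (i + 1) b) ∧
      (∀ j, j < r → (pvA_row ec ic (i + 1) s r).2 (i + 1) (j + 1) = pvC ec ic i j) := by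
  intro r
  induction r with
  | zero =>
    intro _
    refine ⟨fun b hb => ?_, fun j hj => by omega⟩
    interval_cases b
    exact Hcur0
  | succ r ih =>
    intro hr
    obtain ⟨ih1, ih2⟩ := ih (by omega)
    have hup : (pvA_row ec ic (i + 1) s r).1 i (r + 1) = pvN ec ic i (r + 1) := by
      have := pvA_row_untouched ec ic (i + 1) s r i (r + 1) (by omega)
      rw [this.1, Hprev _ (by omega)]
    have hdiag : (pvA_row ec ic (i + 1) s r).1 i r = pvN ec ic i r := by
      have := pvA_row_untouched ec ic (i + 1) s r i r (by omega)
      rw [this.1, Hprev _ (by omega)]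
    have hleft : (pvA_row ec ic (i + 1) s r).1 (i + 1) r = pvN ec ic (i + 1) r :=
      ih1 r (by omega)
    constructor
    · intro b hb
      rcases Nat.lt_or_ge b (r + 1) with hb' | hb'
      · have u := pvA_cell_untouched ec ic (pvA_row ec ic (i + 1) s r) (i + 1) (r + 1)
          (i + 1) b (by omega)
        rw [pvA_row, u.1]
        exact ih1 b (by omega)
      · have hb'' : b = r + 1 := by omega
        subst hb''
        rw [pvA_row, pvA_cell_fst_at]
        simp only [Nat.add_sub_cancel]
        rw [hup, hdiag, hleft, pvN]
    · intro j hj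
      rcases Nat.lt_or_ge j r with hj' | hj'
      · have u := pvA_cell_untouched ec ic (pvA_row ec ic (i + 1) s r) (i + 1) (r + 1)
          (i + 1) (j + 1) (by omega)
        rw [pvA_row, u.2]
        exact ih2 j hj'
      · have hj'' : j = r := by omega
        subst hj''
        rw [pvA_row, pvA_cell_snd_at]
        simp only [Nat.add_sub_cancel]
        rw [hup, hdiag, hleft, pvC]

-- the whole fill: costs are pvN on [0,k]×[0,n], commands are pvC on the interior,
-- everything else is untouched
theorem pvA_fill_correct (ec ic : List Char)
    (s0 : (Nat → Nat → Int) × (Nat → Nat → Int))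
    (H0 : ∀ a, a ≤ ec.length → s0.1 a 0 = pvN ec ic a 0)
    (H0' : ∀ b, b ≤ ic.length → s0.1 0 b = pvN ec ic 0 b) :
    ∀ k, k ≤ ec.length →
      (∀ a b, a ≤ k → b ≤ ic.length → (pvA_fill ec ic s0 k).1 a b = pvN ec ic a b) ∧
      (∀ i j, i < k → j < ic.length →
        (pvA_fill ec ic s0 k).2 (i + 1) (j + 1) = pvC ec ic i j) ∧
      (∀ a b, ¬(1 ≤ a ∧ a ≤ k ∧ 1 ≤ b ∧ b ≤ ic.length) →
        (pvA_fill ec ic s0 k).1 a b = s0.1 a b ∧ (pvA_fill ec ic s0 k).2 a b = s0.2 a b) := by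
  intro k
  induction k with
  | zero =>
    intro _
    refine ⟨fun a b ha hb => ?_, fun i j hi _ => by omega, fun a b _ => ⟨rfl, rfl⟩⟩
    interval_cases a
    exact H0' b hb
  | succ k ih =>
    intro hk
    obtain ⟨ih1, ih2, ih3⟩ := ih (by omega)
    have Hprev : ∀ b, b ≤ ic.length → (pvA_fill ec ic s0 k).1 k b = pvN ec ic k b :=
      fun b hb => ih1 k b (by omega) hb
    have Hcur0 : (pvA_fill ec ic s0 k).1 (k + 1) 0 = pvN ec ic (k + 1) 0 := by
      have := ih3 (k + 1) 0 (by omega)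
      rw [this.1, H0 (k + 1) hk]
    have row := pvA_row_correct ec ic k (pvA_fill ec ic s0 k) Hprev Hcur0 ic.length le_rfl
    refine ⟨fun a b ha hb => ?_, fun i j hi hj => ?_, fun a b hab => ?_⟩
    · rcases Nat.lt_or_ge a (k + 1) with ha' | ha'
      · have u := pvA_row_untouched ec ic (k + 1) (pvA_fill ec ic s0 k) ic.length a b
          (by omega)
        rw [pvA_fill, u.1]
        exact ih1 a b (by omega) hb
      · have ha'' : a = k + 1 := by omega
        subst ha''
        rw [pvA_fill]
        exact row.1 b hb
    · rcases Nat.lt_or_ge i k with hi' | hi'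
      · have u := pvA_row_untouched ec ic (k + 1) (pvA_fill ec ic s0 k) ic.length
          (i + 1) (j + 1) (by omega)
        rw [pvA_fill, u.2]
        exact ih2 i j hi' hj
      · have hi'' : i = k := by omega
        subst hi''
        rw [pvA_fill]
        exact row.2 j hj
    · have u := pvA_row_untouched ec ic (k + 1) (pvA_fill ec ic s0 k) ic.length a b
        (by omega)
      have w := ih3 a b (by omega)
      exact ⟨by rw [pvA_fill, u.1, w.1], by rw [pvA_fill, u.2, w.2]⟩

-- the boundary the two initialisation loops leave in A's nums table
theorem pvA_init_col (ec ic : List Char) (a : Nat) (ha : a ≤ ec.length) :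
    (pvA_loop2 (pvA_loop1 (fun _ _ => 0, fun _ _ => 0) ec.length) ic.length).1 a 0 =
      pvN ec ic a 0 := by
  rw [pvA_loop2_fst, pvA_loop1_fst]
  cases a with
  | zero => simp [pvN]
  | succ a =>
    rw [if_neg (by omega), if_pos (by omega), pvN]
    push_cast
    ring

theorem pvA_init_row (ec ic : List Char) (b : Nat) (hb : b ≤ ic.length) :
    (pvA_loop2 (pvA_loop1 (fun _ _ => 0, fun _ _ => 0) ec.length) ic.length).1 0 b =
      pvN ec ic 0 b := by
  rw [pvA_loop2_fst, pvA_loop1_fst]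
  cases b with
  | zero => simp [pvN]
  | succ b => rw [if_pos (by omega), pvN]

-- A's trailing drain loop counts exactly the reversed prefix
theorem pvDrain_eq_count (ic : List Char) :
    ∀ j, j ≤ ic.length → ∀ d, pvDrain ic j d = pvCount ((ic.take j).reverse) d := by
  intro j
  induction j with
  | zero => intro _ d; rfl
  | succ j ih =>
    intro hj d
    have ht : ic.take (j + 1) = ic.take j ++ [ic.getD j ' '] := by
      rw [List.take_add_one]
      congr 1
      rw [List.getD_eq_getElem?_getD]
      cases h : ic[j]? with
      | none => simp at h; omega
      | some c => simp
    rw [pvDrain, ih (by omega), ht]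
    simp [pvCount]

-- A's traceback, driven by the stored commands (= pvC), counts exactly pvPath
theorem pvA_trace_eq_count (ec ic : List Char) (cmds : Nat → Nat → Int)
    (Hc : ∀ i j, i < ec.length → j < ic.length → cmds (i + 1) (j + 1) = pvC ec ic i j) :
    ∀ i, i ≤ ec.length → ∀ j, j ≤ ic.length → ∀ d,
      pvA_trace cmds ic i j d = pvCount (pvPath ec ic i j) d := by
  intro i
  induction i with
  | zero =>
    intro _ j hj d
    rw [pvA_trace, pvPath, pvDrain_eq_count ic j hj]
  | succ i ihi =>
    intro hi j
    induction j with
    | zero => intro _ d; rw [pvA_trace, pvPath]; rfl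
    | succ j ihj =>
      intro hj d
      rw [pvA_trace, pvPath, Hc i j (by omega) (by omega)]
      unfold pvC
      dsimp only []
      split_ifs <;>
        first
        | omega
        | exact ihi (by omega) j (by omega) d
        | exact ihi (by omega) (j + 1) (by omega) d
        | (simp only [pvCount]; exact ihj (by omega) _)
        | (simp only [pvCount]; exact ihi (by omega) j (by omega) _)

-- B-side: shapes and values of the base row
theorem pvB_base_len (ic : List Char) (k : Nat) : (pvB_base ic k).1.length = k + 1 := by
  induction k with
  | zero => rfl
  | succ k ih => simp [pvB_base, ih]

theorem pvB_base_correct (ic : List Char) :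
    ∀ k, k ≤ ic.length →
      (pvB_base ic k).2 = (ic.take k).reverse ∧
      (∀ j, j ≤ k → (pvB_base ic k).1.getD j (0, []) = (pvN [] ic 0 j, pvPath [] ic 0 j)) := by
  intro k
  induction k with
  | zero =>
    intro _
    refine ⟨rfl, fun j hj => ?_⟩
    interval_cases j
    simp [pvB_base, pvN, pvPath]
  | succ k ih =>
    intro hk
    obtain ⟨ih2, ih1⟩ := ih (by omega)
    have ht : ic.take (k + 1) = ic.take k ++ [ic.getD k ' '] := by
      rw [List.take_add_one]
      congr 1
      rw [List.getD_eq_getElem?_getD]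
      cases h : ic[k]? with
      | none => simp at h; omega
      | some c => simp
    have hpath : ic.getD k ' ' :: (pvB_base ic k).2 = (ic.take (k + 1)).reverse := by
      rw [ih2, ht]; simp
    refine ⟨hpath, fun j hj => ?_⟩
    rcases Nat.lt_or_ge j (k + 1) with hj' | hj'
    · simp only [pvB_base]
      rw [List.getD_append _ _ _ _ (by rw [pvB_base_len]; omega)]
      exact ih1 j (by omega)
    · have hj'' : j = k + 1 := by omega
      subst hj''
      simp only [pvB_base]
      rw [List.getD_eq_getElem?_getD, List.getElem?_append_right (by rw [pvB_base_len]),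
        pvB_base_len, Nat.sub_self]
      simp only [List.getElem?_cons_zero, Option.getD_some]
      rw [hpath]
      have : pvN [] ic 0 (k + 1) = ((k : Int) + 1) := by simp [pvN]
      rw [this, pvPath]

-- pvN and pvPath at row 0 do not depend on ec
theorem pvN_zero (ec ic : List Char) (j : Nat) : pvN ec ic 0 j = pvN [] ic 0 j := by
  rw [pvN, pvN]

theorem pvPath_zero (ec ic : List Char) (j : Nat) : pvPath ec ic 0 j = pvPath [] ic 0 j := by
  rw [pvPath, pvPath]

theorem pvB_row_len (c : Char) (ic : List Char) (prev : List (Int × List Char)) (i : Int)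
    (r : Nat) : (pvB_row c ic prev i r).length = r + 1 := by
  induction r with
  | zero => rfl
  | succ r ih =>
    rw [pvB_row]
    dsimp only []
    split_ifs <;> simp [ih]

-- B's row i+1 built from a correct row i carries the pvN costs and pvPath lists
theorem pvB_row_correct (ec ic : List Char) (i : Nat) (prev : List (Int × List Char))
    (Hprev : ∀ b, b ≤ ic.length → prev.getD b (0, []) = (pvN ec ic i b, pvPath ec ic i b)) :
    ∀ r, r ≤ ic.length → ∀ b, b ≤ r →
      (pvB_row (ec.getD i ' ') ic prev ((i : Int) + 1) r).getD b (0, []) =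
        (pvN ec ic (i + 1) b, pvPath ec ic (i + 1) b) := by
  intro r
  induction r with
  | zero =>
    intro _ b hb
    interval_cases b
    simp [pvB_row, pvN, pvPath]
  | succ r ih =>
    intro hr b hb
    rcases Nat.lt_or_ge b (r + 1) with hb' | hb'
    · rw [pvB_row]
      dsimp only []
      have hlen := pvB_row_len (ec.getD i ' ') ic prev ((i : Int) + 1) r
      split_ifs <;> rw [List.getD_append _ _ _ _ (by rw [hlen]; omega)] <;>
        exact ih (by omega) b (by omega)
    · have hb'' : b = r + 1 := by omega
      subst hb''
      have hlen := pvB_row_len (ec.getD i ' ') ic prev ((i : Int) + 1) r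
      have hcur : (pvB_row (ec.getD i ' ') ic prev ((i : Int) + 1) r).getD r (0, []) =
          (pvN ec ic (i + 1) r, pvPath ec ic (i + 1) r) := ih (by omega) r (by omega)
      have hget : ∀ x : Int × List Char,
          (pvB_row (ec.getD i ' ') ic prev ((i : Int) + 1) r ++ [x]).getD (r + 1) (0, []) = x := by
        intro x
        rw [List.getD_eq_getElem?_getD, List.getElem?_append_right (by omega), hlen,
          Nat.sub_self]
        simp
      rw [pvB_row]
      dsimp only []
      rw [Hprev (r + 1) (by omega), Hprev r (by omega), hcur]
      dsimp only []
      by_cases h1 : (ec.getD i ' ' == ic.getD r ' ') = true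
      · rw [if_pos h1, hget, pvN, pvPath, if_pos h1, if_pos h1]
      · rw [if_neg h1]
        by_cases h2 : min (min (pvN ec ic i (r + 1)) (pvN ec ic (i + 1) r)) (pvN ec ic i r) =
            pvN ec ic i (r + 1)
        · rw [if_pos h2, hget, pvN, pvPath, if_neg h1, if_neg h1, if_pos h2, h2]
        · rw [if_neg h2]
          by_cases h3 : min (min (pvN ec ic i (r + 1)) (pvN ec ic (i + 1) r)) (pvN ec ic i r) =
              pvN ec ic (i + 1) r
          · rw [if_pos h3, hget, pvN, pvPath, if_neg h1, if_neg h1, if_neg h2, if_pos h3, h3]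
          · have h4 : min (min (pvN ec ic i (r + 1)) (pvN ec ic (i + 1) r)) (pvN ec ic i r) =
                pvN ec ic i r := by omega
            rw [if_neg h3, hget, pvN, pvPath, if_neg h1, if_neg h1, if_neg h2, if_neg h3, h4]

-- the full fill: the last row carries pvN/pvPath at row ec.length
theorem pvB_fill_correct (ec ic : List Char) :
    ∀ k, k ≤ ec.length → ∀ b, b ≤ ic.length →
      (pvB_fill ec ic (pvB_base ic ic.length).1 k).getD b (0, []) =
        (pvN ec ic k b, pvPath ec ic k b) := by
  intro k
  induction k with
  | zero =>
    intro _ b hb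
    have := (pvB_base_correct ic ic.length le_rfl).2 b hb
    rw [pvB_fill, this, pvN_zero ec ic b, pvPath_zero ec ic b]
  | succ k ih =>
    intro hk b hb
    rw [pvB_fill]
    exact pvB_row_correct ec ic k _ (fun b' hb' => ih (by omega) b' hb') ic.length le_rfl b hb

-- ===== VERDICT (by name: the statement is the Claim_ definition above) =====
theorem get_uncorrected_errors_spec : Claim_equal_get_uncorrected_errors := by
  unfold Claim_equal_get_uncorrected_errors Spec_get_uncorrected_errors
  intro es is _
  unfold get_uncorrected_errors get_uncorrected_errors_alt
  dsimp only []
  have fill := pvA_fill_correct es.toList is.toList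
    (pvA_loop2 (pvA_loop1 (fun _ _ => 0, fun _ _ => 0) es.toList.length) is.toList.length)
    (pvA_init_col es.toList is.toList) (pvA_init_row es.toList is.toList)
    es.toList.length le_rfl
  rw [pvA_trace_eq_count es.toList is.toList _ fill.2.1 es.toList.length le_rfl
    is.toList.length le_rfl PySem.Dict.empty]
  rw [pvB_fill_correct es.toList is.toList es.toList.length le_rfl is.toList.length le_rfl]
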